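-- pv_equiv track=rewrite | github.com/JiEung2/TIL | Python/SWEA/14940.py | check
-- ===== SOURCE A (Python) =====
-- def check(s, N, M):
--     for i in range(N):
--         for j in range(N-M+1):
--             k = j + M
--             if s[i][j:k][::-1] == s[i][j:k]:
--                 return ''.join(s[i][j:k])
--
--     for i in range(N):
--         for j in range(N-M+1):
--             tmp_lst2 = []
--             for k in range(j, j+M):
--                 tmp_lst2.append(s[k][i])
--
--             if tmp_lst2 == tmp_lst2[::-1]:
--                 return ''.join(tmp_lst2)
-- ===== SOURCE B (Python) =====
-- def _expand(line, c, d):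
--     """Maximal palindromic radius around a center: the number of matching mirrored
--     character pairs (c-1, c+d), (c-2, c+d+1), ...  (d = 1 leaves a middle char)."""
--     t = 0
--     L = len(line)
--     while c - t - 1 >= 0 and c + t + d < L and line[c - t - 1] == line[c + t + d]:
--         t += 1
--     return t
--
--
-- def _first_pal(line, n, M):
--     """First start j <= n-M whose length-M window of line[:n] is palindromic, by the
--     expand-around-center method: the window centred at c is palindromic iff the
--     maximal radius there reaches M//2."""
--     h, d = divmod(M, 2)
--     hi = n - h if d else n - h + 1
--     rad = [_expand(line, c, d) for c in range(h, hi)]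
--     c = h
--     for r in rad:
--         if r >= h:
--             return line[c - h:c + h + d]
--         c += 1
--     return None
--
--
-- def check(s, N, M):
--     if M < 1 or N < M:
--         return None  # no window of positive length M fits
--     lines = list(s[:N]) + [''.join(s[k][i] for k in range(N)) for i in range(N)]
--     for line in lines:
--         w = _first_pal(line, N, M)
--         if w is not None:
--             return w
--     return None
-- ===== Notes on version B (the rewrite author's own statement) =====
-- stated objective: alternative
-- what changed: B finds palindromic windows by the classic expand-around-center method: per line it precomputes the maximal palindromic radius at every window center (one parity, chosen by M's parity) and returns the first window whose radius reaches M//2, instead of A's slice-reverse-compare on every window and per-window column list building; rows and transposed column lines are built once and scanned by one routine.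
-- outside the precondition, e.g. on check(['ab', 'ba'], 2, -1): A returns 'a', B returns None; on check(['bcca', 'bbcc', 'abba', 'ccb'], 4, 3): A returns 'aca', B raises IndexError
import Mathlib
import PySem

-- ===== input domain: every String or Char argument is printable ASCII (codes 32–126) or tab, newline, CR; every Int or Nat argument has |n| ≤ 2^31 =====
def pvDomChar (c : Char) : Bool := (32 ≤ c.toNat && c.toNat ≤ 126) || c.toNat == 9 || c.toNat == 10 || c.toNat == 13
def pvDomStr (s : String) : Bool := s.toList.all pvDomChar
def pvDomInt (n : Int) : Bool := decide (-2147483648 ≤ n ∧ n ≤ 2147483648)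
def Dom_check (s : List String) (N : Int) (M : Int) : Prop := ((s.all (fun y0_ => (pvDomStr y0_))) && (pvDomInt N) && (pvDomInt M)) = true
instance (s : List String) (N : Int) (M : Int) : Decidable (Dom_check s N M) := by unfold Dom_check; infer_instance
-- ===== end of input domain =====

-- B replaces A's slice-reverse-compare on every window by the expand-around-center
-- method: per line it precomputes the maximal palindromic radius at each window
-- center and picks the first window whose radius reaches M//2 (objective:
-- alternative algorithm; no argument is mutated).

-- ===== PORT A =====
-- inner 'for j in range(N-M+1)' of the row pass: fuel = remaining iterations
def checkRowJ (row : List Char) (M : Int) (fuel : Nat) (j : Int) : Option String :=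
  match fuel with
  | 0 => none
  | fuel' + 1 =>
    let t := PySem.List.slice row (some j) (some (j + M))
    if t.reverse = t then some (String.ofList t)
    else checkRowJ row M fuel' (j + 1)

-- outer 'for i in range(N)' of the row pass
def checkRowI (s : List String) (N M : Int) (fuel : Nat) (i : Int) : Option String :=
  match fuel with
  | 0 => none
  | fuel' + 1 =>
    match checkRowJ (PySem.List.pyGetD s i "").toList M (N - M + 1).toNat 0 with
    | some r => some r
    | none => checkRowI s N M fuel' (i + 1)

-- 'for k in range(j, j+M): tmp_lst2.append(s[k][i])'
def buildCol (s : List String) (i : Int) (fuel : Nat) (k : Int) (acc : List Char) : List Char :=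
  match fuel with
  | 0 => acc
  | fuel' + 1 =>
    buildCol s i fuel' (k + 1) (acc ++ [PySem.List.pyGetD (PySem.List.pyGetD s k "").toList i ' '])

-- inner 'for j in range(N-M+1)' of the column pass
def checkColJ (s : List String) (i M : Int) (fuel : Nat) (j : Int) : Option String :=
  match fuel with
  | 0 => none
  | fuel' + 1 =>
    let t := buildCol s i M.toNat j []
    if t = t.reverse then some (String.ofList t)
    else checkColJ s i M fuel' (j + 1)

-- outer 'for i in range(N)' of the column pass
def checkColI (s : List String) (N M : Int) (fuel : Nat) (i : Int) : Option String :=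
  match fuel with
  | 0 => none
  | fuel' + 1 =>
    match checkColJ s i M (N - M + 1).toNat 0 with
    | some r => some r
    | none => checkColI s N M fuel' (i + 1)

def check (s : List String) (N : Int) (M : Int) : Option String :=
  match checkRowI s N M N.toNat 0 with
  | some r => some r
  | none => checkColI s N M N.toNat 0

-- ===== PORT B =====
-- the while loop of '_expand(line, c, d)'; it runs at most c iterations (its guard
-- needs c - t - 1 ≥ 0), so fuel c.toNat makes the recursion structural and exact
def expandLoop (line : List Char) (c d : Int) (fuel : Nat) (t : Int) : Int :=
  match fuel with
  | 0 => t
  | fuel' + 1 =>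
    if 0 ≤ c - t - 1 ∧ c + t + d < (line.length : Int) ∧
        PySem.List.pyGetD line (c - t - 1) ' ' = PySem.List.pyGetD line (c + t + d) ' '
    then expandLoop line c d fuel' (t + 1) else t

-- '_expand(line, c, d)': maximal palindromic radius around a center
def expandR (line : List Char) (c d : Int) : Int := expandLoop line c d c.toNat 0

-- 'c = h; for r in rad: if r >= h: return line[c-h:c+h+d]; c += 1'
def pickPal (line : List Char) (c h d : Int) (rad : List Int) : Option String :=
  match rad with
  | [] => none
  | r :: rest =>
    if r ≥ h then
      some (String.ofList (PySem.List.slice line (some (c - h)) (some (c + h + d))))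
    else pickPal line (c + 1) h d rest

-- '_first_pal(line, n, M)': radii of all window centers, then the first big enough
def firstPal (line : List Char) (n M : Int) : Option String :=
  let h := PySem.Int.floordiv M 2
  let d := PySem.Int.mod M 2
  let hi := if d ≠ 0 then n - h else n - h + 1
  let rad := (PySem.List.pyRange h hi 1).map (fun c => expandR line c d)
  pickPal line h h d rad

-- "''.join(s[k][i] for k in range(N))" as a character list
def colChars (s : List String) (i N : Int) : List Char :=
  (PySem.List.pyRange 0 N 1).map (fun k => PySem.List.pyGetD (PySem.List.pyGetD s k "").toList i ' ')

-- 'for line in lines: w = _first_pal(line, N, M); if w is not None: return w'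
def scanLines (lines : List String) (n M : Int) : Option String :=
  match lines with
  | [] => none
  | l :: rest =>
    match firstPal l.toList n M with
    | some w => some w
    | none => scanLines rest n M

def check_alt (s : List String) (N : Int) (M : Int) : Option String :=
  if M < 1 ∨ N < M then none  -- no window of positive length M fits
  else
    let lines := PySem.List.slice s none (some N) ++
      (PySem.List.pyRange 0 N 1).map (fun i => String.ofList (colChars s i N))
    scanLines lines N M

-- ===== PRECONDITION & SPEC =====
-- Pre_ admits every N ≤ 0 and every 1 ≤ M with N < M (both programs return None there) and
-- otherwise 1 ≤ M with the problem's natural grid shape (at least N rows, the first N of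
-- length ≥ N).  Excluded although A returns there: M ≤ 0 with N ≥ 1, where A's windows
-- s[i][j:j+M] are negative-end Python slices (length len(row)+M, not M) that nobody would
-- specify and B returns None; and ragged grids, where A may answer from its row pass while
-- B's eager column build raises an IndexError.
def Pre_check (s : List String) (N : Int) (M : Int) : Prop :=
  N ≤ 0 ∨ (1 ≤ M ∧ (N < M ∨ (N ≤ (s.length : Int) ∧ ∀ r ∈ s.take N.toNat, N ≤ (r.toList.length : Int))))
instance (s : List String) (N : Int) (M : Int) : Decidable (Pre_check s N M) := by
  unfold Pre_check; infer_instance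
def pvWitness_check : List String × Int × Int := (["ab", "ba"], 2, 1)
def Spec_check (s : List String) (N : Int) (M : Int) (out : Option String) : Prop := out = check_alt s N M
instance (s : List String) (N : Int) (M : Int) (out : Option String) : Decidable (Spec_check s N M out) := by unfold Spec_check; infer_instance

-- ===== CLAIM (what is proved, stated in full; the proofs are below) =====
def Claim_equal_check : Prop := ∀ (s : List String) (N : Int) (M : Int), Dom_check s N M → Pre_check s N M → Spec_check s N M (check s N M)

-- ===== LEMMAS AND PROOFS =====
lemma slice_window (line : List Char) (j M : Int) (h0 : 0 ≤ j) (hM : 0 ≤ M) :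
    PySem.List.slice line (some j) (some (j + M)) = (line.drop j.toNat).take M.toNat := by
  rw [PySem.List.slice_toNat _ h0 (by omega)]
  congr 1
  omega

-- the while loop never shrinks below its starting radius
lemma expandLoop_ge : ∀ (fuel : Nat) (line : List Char) (c d t : Int),
    t ≤ expandLoop line c d fuel t := by
  intro fuel
  induction fuel with
  | zero => intro line c d t; exact le_refl t
  | succ fuel' ih =>
    intro line c d t
    rw [expandLoop]
    split_ifs with h
    · have := ih line c d (t + 1)
      omega
    · exact le_refl t

-- with enough fuel, the radius reaches h iff every mirrored pair up to h matches
lemma expandLoop_spec : ∀ (fuel : Nat) (line : List Char) (c d h t : Int),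
    (h - t).toNat ≤ fuel → 0 ≤ t → t ≤ h → h ≤ c → c + h - 1 + d < (line.length : Int) → 0 ≤ d →
    (h ≤ expandLoop line c d fuel t ↔ ∀ u : Int, t ≤ u → u < h →
      PySem.List.pyGetD line (c - u - 1) ' ' = PySem.List.pyGetD line (c + u + d) ' ') := by
  intro fuel
  induction fuel with
  | zero =>
    intro line c d h t hfuel h0t hth hhc hbound h0d
    have hth' : t = h := by omega
    subst hth'
    rw [expandLoop]
    constructor
    · intro _ u h1 h2
      omega
    · intro _
      exact le_refl t
  | succ fuel' ih =>
    intro line c d h t hfuel h0t hth hhc hbound h0d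
    by_cases hlt : t < h
    · rw [expandLoop]
      by_cases hc : PySem.List.pyGetD line (c - t - 1) ' ' = PySem.List.pyGetD line (c + t + d) ' '
      · rw [if_pos ⟨by omega, by omega, hc⟩]
        rw [ih line c d h (t + 1) (by omega) (by omega) (by omega) hhc hbound h0d]
        constructor
        · intro hall u htu huh
          rcases eq_or_lt_of_le htu with heq | hlt'
          · exact heq ▸ hc
          · exact hall u (by omega) huh
        · intro hall u htu huh
          exact hall u (by omega) huh
      · rw [if_neg (by intro hco; exact hc hco.2.2)]
        constructor
        · intro hle
          omega
        · intro hall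
          exact absurd (hall t le_rfl hlt) hc
    · have hth' : t = h := by omega
      subst hth'
      constructor
      · intro _ u h1 h2
        omega
      · intro _
        exact expandLoop_ge (fuel' + 1) line c d t

-- a list equals its reverse iff it matches itself pointwise back to front
lemma rev_iff_pointwise (w : List Char) :
    w.reverse = w ↔ ∀ p : Nat, p < w.length → w.getD p ' ' = w.getD (w.length - 1 - p) ' ' := by
  constructor
  · intro hrev p hp
    have h1 := congrArg (fun l => l.getD p ' ') hrev
    simp only [] at h1
    rw [List.getD_eq_getElem?_getD, List.getD_eq_getElem?_getD, List.getElem?_reverse hp] at h1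
    rw [List.getD_eq_getElem?_getD, List.getD_eq_getElem?_getD]
    exact h1.symm
  · intro hall
    apply List.ext_getElem (by simp)
    intro p hp1 hp2
    have h := hall p hp2
    rw [List.getD_eq_getElem _ _ hp2, List.getD_eq_getElem _ _ (by omega)] at h
    rw [List.getElem_reverse]
    exact h.symm

-- a window is palindromic iff the radius at its center reaches h
lemma window_pal_iff (line : List Char) (j M h d n : Int)
    (h0j : 0 ≤ j) (hM : 1 ≤ M) (hhd : M = 2 * h + d) (hd0 : 0 ≤ d) (hd1 : d ≤ 1)
    (hjM : j + M ≤ n) (hn : n ≤ (line.length : Int)) :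
    ((PySem.List.slice line (some j) (some (j + M))).reverse =
        PySem.List.slice line (some j) (some (j + M))) ↔
      h ≤ expandR line (j + h) d := by
  have h0h : 0 ≤ h := by omega
  have hlen : j.toNat + M.toNat ≤ line.length := by omega
  set w := PySem.List.slice line (some j) (some (j + M)) with hw
  have hwdt : w = (line.drop j.toNat).take M.toNat := slice_window line j M h0j (by omega)
  have hwlen : w.length = M.toNat := by
    rw [hwdt, List.length_take, List.length_drop]
    omega
  have hwget : ∀ p : Nat, p < M.toNat → w.getD p ' ' = line.getD (j.toNat + p) ' ' := by
    intro p hp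
    rw [hwdt, List.getD_eq_getElem?_getD, List.getD_eq_getElem?_getD,
      List.getElem?_take_of_lt hp, List.getElem?_drop]
  have hget : ∀ u : Int, 0 ≤ u → u < (line.length : Int) →
      PySem.List.pyGetD line u ' ' = line.getD u.toNat ' ' := by
    intro u h1 h2
    rw [PySem.List.pyGetD_eq_getElem line ' ' h1 (by omega),
      List.getD_eq_getElem _ _ (by omega)]
  rw [rev_iff_pointwise w, expandR,
    expandLoop_spec (j + h).toNat line (j + h) d h 0 (by omega) le_rfl h0h (by omega)
      (by omega) hd0]
  constructor
  · intro hall u h0u huh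
    have hp : (h - 1 - u).toNat < M.toNat := by omega
    have := hall (h - 1 - u).toNat (by omega)
    rw [hwget _ hp, hwget _ (by omega), hwlen] at this
    rw [hget _ (by omega) (by omega), hget _ (by omega) (by omega)]
    rw [show (j + h - u - 1).toNat = j.toNat + (h - 1 - u).toNat by omega,
      show (j + h + u + d).toNat = j.toNat + (M.toNat - 1 - (h - 1 - u).toNat) by omega]
    exact this
  · intro hall p hp
    rw [hwlen] at hp
    rw [hwget _ hp, hwget _ (by omega), hwlen]
    by_cases hph : (p : Int) < h
    · have := hall (h - 1 - p) (by omega) (by omega)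
      rw [hget _ (by omega) (by omega), hget _ (by omega) (by omega)] at this
      rw [show (j + h - (h - 1 - ↑p) - 1).toNat = j.toNat + p by omega,
        show (j + h + (h - 1 - ↑p) + d).toNat = j.toNat + (M.toNat - 1 - p) by omega] at this
      exact this
    · by_cases hph2 : ((M.toNat : Int) - 1 - p) < h
      · have := hall (h - 1 - ((M.toNat : Int) - 1 - p)) (by omega) (by omega)
        rw [hget _ (by omega) (by omega), hget _ (by omega) (by omega)] at this
        rw [show (j + h - (h - 1 - ((M.toNat : Int) - 1 - ↑p)) - 1).toNat
              = j.toNat + (M.toNat - 1 - p) by omega,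
          show (j + h + (h - 1 - ((M.toNat : Int) - 1 - ↑p)) + d).toNat
              = j.toNat + p by omega] at this
        exact this.symm
      · rw [show M.toNat - 1 - p = p by omega]

lemma col_slice (f : Int → Char) (Nn : Nat) (j M : Int) (h0 : 0 ≤ j) (hM : 0 ≤ M)
    (hJM : j + M ≤ (Nn : Int)) :
    PySem.List.slice ((PySem.List.pyRange 0 Nn 1).map f) (some j) (some (j + M))
      = (PySem.List.pyRange j (j + M) 1).map f := by
  rw [slice_window _ _ _ h0 hM]
  rw [PySem.List.pyRange_one_append 0 j Nn h0 (by omega),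
    PySem.List.pyRange_one_append j (j + M) Nn (by omega) hJM, List.map_append, List.map_append]
  have hl1 : ((PySem.List.pyRange 0 j 1).map f).length = j.toNat := by
    rw [List.length_map, PySem.List.length_pyRange_one]
    omega
  have hl2 : ((PySem.List.pyRange j (j + M) 1).map f).length = M.toNat := by
    rw [List.length_map, PySem.List.length_pyRange_one]
    omega
  rw [← hl1, List.drop_left, ← hl2, List.take_left]

-- the per-line scan of B equals A's row-window scan
lemma rowJ_eq_pick : ∀ (k : Nat) (line : List Char) (j n M h d : Int),
    (n - M + 1 - j).toNat = k → 0 ≤ j → 1 ≤ M → M ≤ n → n ≤ (line.length : Int) →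
    M = 2 * h + d → 0 ≤ d → d ≤ 1 →
    checkRowJ line M k j =
      pickPal line (j + h) h d ((PySem.List.pyRange (j + h)
        (if d ≠ 0 then n - h else n - h + 1) 1).map (fun c => expandR line c d)) := by
  intro k
  induction k using Nat.strong_induction_on with
  | _ k ih =>
    intro line j n M h d hk h0j hM hMn hn hhd hd0 hd1
    have hhi : (if d ≠ 0 then n - h else n - h + 1) = (n - M + 1) + h := by
      split_ifs <;> omega
    rw [hhi]
    by_cases hj : j < n - M + 1
    · rw [show k = (k - 1) + 1 by omega, checkRowJ,
        PySem.List.pyRange_one_cons (by omega : j + h < (n - M + 1) + h), List.map_cons, pickPal]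
      rw [← ge_iff_le] at *
      have hiff := window_pal_iff line j M h d n h0j hM hhd hd0 hd1 (by omega) hn
      by_cases hc : (PySem.List.slice line (some j) (some (j + M))).reverse =
          PySem.List.slice line (some j) (some (j + M))
      · rw [if_pos hc, if_pos (hiff.mp hc)]
        rw [show j + h - h = j by omega, show j + h + h + d = j + M by omega]
      · rw [if_neg hc, if_neg (fun hb => hc (hiff.mpr hb))]
        have := ih (k - 1) (by omega) line (j + 1) n M h d (by omega) (by omega)
          hM hMn hn hhd hd0 hd1
        rw [hhi] at this
        rw [this, show j + 1 + h = j + h + 1 by omega]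
    · rw [show k = 0 by omega, checkRowJ,
        PySem.List.pyRange_one_eq_nil (by omega), List.map_nil, pickPal]

lemma firstPal_eq (line : List Char) (n M : Int) (hM : 1 ≤ M) (hMn : M ≤ n)
    (hn : n ≤ (line.length : Int)) :
    firstPal line n M = checkRowJ line M (n - M + 1).toNat 0 := by
  have h2 : (0 : Int) < 2 := by omega
  simp only [firstPal, PySem.Int.floordiv_eq_ediv_of_pos h2, PySem.Int.mod_eq_emod_of_pos h2]
  have := rowJ_eq_pick (n - M + 1).toNat line 0 n M (M / 2) (M % 2) (by omega) le_rfl hM hMn hn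
    (by omega) (by omega) (by omega)
  rw [this, zero_add]

lemma buildCol_eq : ∀ (fuel : Nat) (s : List String) (i k : Int) (acc : List Char),
    buildCol s i fuel k acc = acc ++ (PySem.List.pyRange k (k + fuel) 1).map
      (fun t => PySem.List.pyGetD (PySem.List.pyGetD s t "").toList i ' ') := by
  intro fuel
  induction fuel with
  | zero =>
    intro s i k acc
    rw [buildCol, PySem.List.pyRange_one_eq_nil (by omega)]
    simp
  | succ fuel' ih =>
    intro s i k acc
    have hcast : k + ((fuel' + 1 : Nat) : Int) = (k + 1) + (fuel' : Nat) := by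
      push_cast
      ring
    rw [buildCol, ih, hcast,
      PySem.List.pyRange_one_cons (by omega : k < k + 1 + (fuel' : Nat)), List.map_cons]
    simp

lemma colJ_eq_rowJ : ∀ (k : Nat) (s : List String) (i j N M : Int),
    ((N - M + 1) - j).toNat = k → 0 ≤ j → 0 ≤ M → N - M + 1 ≤ N →
    checkColJ s i M k j = checkRowJ (colChars s i N) M k j := by
  intro k
  induction k using Nat.strong_induction_on with
  | _ k ih =>
    intro s i j N M hk h0j h0M hNN
    by_cases hj : j < N - M + 1
    · rw [show k = (k - 1) + 1 by omega, checkColJ, checkRowJ]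
      have hbc : buildCol s i M.toNat j [] =
          PySem.List.slice (colChars s i N) (some j) (some (j + M)) := by
        rw [buildCol_eq, List.nil_append]
        unfold colChars
        rw [show (N : Int) = ((N.toNat : Nat) : Int) by omega]
        rw [col_slice _ N.toNat j M h0j h0M (by omega)]
        rw [show j + (M.toNat : Int) = j + M by omega]
      rw [hbc]
      by_cases hc : (PySem.List.slice (colChars s i N) (some j) (some (j + M))).reverse =
          PySem.List.slice (colChars s i N) (some j) (some (j + M))
      · rw [if_pos hc, if_pos hc.symm]
      · rw [if_neg hc, if_neg (fun hb => hc hb.symm)]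
        exact ih (k - 1) (by omega) s i (j + 1) N M (by omega) (by omega) h0M hNN
    · rw [show k = 0 by omega, checkColJ, checkRowJ]

lemma cols_eq : ∀ (k : Nat) (s : List String) (i N M : Int), (N - i).toNat = k →
    0 ≤ i → 1 ≤ M → M ≤ N →
    scanLines ((PySem.List.pyRange i N 1).map (fun i' => String.ofList (colChars s i' N))) N M
      = checkColI s N M k i := by
  intro k
  induction k using Nat.strong_induction_on with
  | _ k ih =>
    intro s i N M hk h0i hM hMN
    by_cases h : i < N
    · rw [PySem.List.pyRange_one_cons h, List.map_cons, scanLines,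
        show k = (k - 1) + 1 by omega, checkColI]
      have htl : (String.ofList (colChars s i N)).toList = colChars s i N := by simp
      have hlen : (N : Int) ≤ ((colChars s i N).length : Int) := by
        unfold colChars
        rw [List.length_map, PySem.List.length_pyRange_one]
        omega
      rw [htl, firstPal_eq _ N M hM hMN hlen,
        ← colJ_eq_rowJ (N - M + 1).toNat s i 0 N M (by omega) le_rfl (by omega) (by omega)]
      cases checkColJ s i M (N - M + 1).toNat 0 with
      | some r => rfl
      | none => exact ih (k - 1) (by omega) s (i + 1) N M (by omega) (by omega) hM hMN
    · rw [PySem.List.pyRange_one_eq_nil (by omega), List.map_nil, scanLines,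
        show k = 0 by omega, checkColI]

lemma rows_eq : ∀ (k : Nat) (s : List String) (i N M : Int) (cols : List String),
    (N - i).toNat = k → 0 ≤ i → i ≤ N → 1 ≤ M → M ≤ N → N ≤ (s.length : Int) →
    (∀ r ∈ s.take N.toNat, N ≤ (r.toList.length : Int)) →
    scanLines ((s.take N.toNat).drop i.toNat ++ cols) N M =
      (match checkRowI s N M k i with
       | some r => some r
       | none => scanLines cols N M) := by
  intro k
  induction k using Nat.strong_induction_on with
  | _ k ih =>
    intro s i N M cols hk h0i hiN hM hMN hNs hrows
    have htlen : (s.take N.toNat).length = N.toNat := by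
      rw [List.length_take]
      omega
    by_cases h : i < N
    · have hlt : i.toNat < (s.take N.toNat).length := by omega
      rw [List.drop_eq_getElem_cons hlt, List.cons_append, scanLines,
        show k = (k - 1) + 1 by omega, checkRowI]
      have hel : (s.take N.toNat)[i.toNat] = PySem.List.pyGetD s i "" := by
        rw [List.getElem_take, PySem.List.pyGetD_eq_getElem s "" h0i (by omega)]
      have hmem : (s.take N.toNat)[i.toNat] ∈ s.take N.toNat := List.getElem_mem hlt
      have hlen : (N : Int) ≤ (((PySem.List.pyGetD s i "").toList.length : Nat) : Int) := by
        rw [← hel]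
        exact hrows _ hmem
      rw [hel, firstPal_eq _ N M hM hMN hlen]
      cases checkRowJ (PySem.List.pyGetD s i "").toList M (N - M + 1).toNat 0 with
      | some r => rfl
      | none =>
        simpa [show i.toNat + 1 = (i + 1).toNat by omega] using
          ih (k - 1) (by omega) s (i + 1) N M cols (by omega) (by omega) (by omega)
            hM hMN hNs hrows
    · have hnil : List.drop i.toNat (s.take N.toNat) = [] :=
        List.drop_eq_nil_of_le (by omega)
      rw [hnil, List.nil_append, show k = 0 by omega, checkRowI]

-- with no window (N - M + 1 <= 0) both passes of A return None
lemma rowI_none (s : List String) (N M : Int) (hg : N - M + 1 ≤ 0) :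
    ∀ (fuel : Nat) (i : Int), checkRowI s N M fuel i = none := by
  intro fuel
  induction fuel with
  | zero => intro i; rw [checkRowI]
  | succ fuel' ih =>
    intro i
    rw [checkRowI, show (N - M + 1).toNat = 0 by omega, checkRowJ]
    exact ih (i + 1)

lemma colI_none (s : List String) (N M : Int) (hg : N - M + 1 ≤ 0) :
    ∀ (fuel : Nat) (i : Int), checkColI s N M fuel i = none := by
  intro fuel
  induction fuel with
  | zero => intro i; rw [checkColI]
  | succ fuel' ih =>
    intro i
    rw [checkColI, show (N - M + 1).toNat = 0 by omega, checkColJ]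
    exact ih (i + 1)

-- ===== VERDICT (by name: the statement is the Claim_ definition above) =====
theorem check_spec : Claim_equal_check := by
  intro s N M hdom hpre
  unfold Spec_check check check_alt
  rcases hpre with hN0 | ⟨hM, hNM | ⟨hNs, hrows⟩⟩
  · rw [if_pos (by omega : M < 1 ∨ N < M), show N.toNat = 0 by omega, checkRowI, checkColI]
  · rw [if_pos (Or.inr hNM), rowI_none s N M (by omega), colI_none s N M (by omega)]
  · by_cases hNM : N < M
    · rw [if_pos (Or.inr hNM), rowI_none s N M (by omega), colI_none s N M (by omega)]
    · rw [if_neg (by omega)]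
      have hN0 : 0 ≤ N := by omega
      rw [PySem.List.slice_to _ hN0]
      rw [show s.take N.toNat = (s.take N.toNat).drop (0 : Int).toNat by simp]
      rw [rows_eq N.toNat s 0 N M _ (by omega) le_rfl (by omega) hM (by omega) hNs hrows]
      rw [cols_eq N.toNat s 0 N M (by omega) le_rfl hM (by omega)]
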